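-- pv_equiv track=rewrite | github.com/arriopolis/AOC2019 | 22/stan.py | reverse_shuffle
-- ===== SOURCE A (Python) =====
-- def cut_inv(pos, N, cut_num):
--     return (pos + cut_num) % N
--
-- def deal_into_new_stack_inv(pos, N):
--     return N - 1 - pos
--
-- def deal_with_increment_inv(pos, N, incr):
--     c = modinv(N % incr, incr) * (- pos) % incr
--     return (pos + c * N) // incr
--
-- def reverse_shuffle(pos, N, rev_g):
--     for line in rev_g:
--         if line[0] == 'c':
--             cut_num = int(line[3:])
--             pos = cut_inv(pos, N, cut_num)
--         elif line[5] == 'w':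
--             incr = int(line[19:])
--             pos = deal_with_increment_inv(pos, N, incr)
--         elif line[5] == 'i':
--             pos = deal_into_new_stack_inv(pos, N)
--     return pos
--
-- def egcd(a, b):
--     if a == 0:
--         return (b, 0, 1)
--     else:
--         g, y, x = egcd(b % a, a)
--         return (g, x - (b // a) * y, y)
--
-- def modinv(a, m):
--     g, x, y = egcd(a, m)
--     if g != 1:
--         raise Exception('modular inverse does not exist')
--     else:
--         return x % m
-- ===== SOURCE B (Python) =====
-- def reverse_shuffle(pos, N, rev_g):
--     # Pass 1: parse the lines into operations.
--     ops = []
--     for line in rev_g: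
--         if line[0] == 'c':
--             ops.append(('c', int(line[3:])))
--         elif line[5] == 'w':
--             ops.append(('w', int(line[19:])))
--         elif line[5] == 'i':
--             ops.append(('s', 0))
--     if not ops:
--         return pos  # no shuffle operations: the position is unchanged
--     # Pass 2: compose all inverse shuffles into one affine map x -> (a*x + b) % N.
--     a, b = 1, 0
--     for kind, val in ops:
--         if kind == 'c':
--             b = (b + val) % N
--         elif kind == 'w':
--             inv = pow(val, -1, N)
--             a, b = a * inv % N, b * inv % N
--         else:
--             a, b = -a % N, (-1 - b) % N
--     return (a * pos + b) % N
-- ===== Notes on version B (the rewrite author's own statement) =====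
-- stated objective: alternative
-- what changed: B parses the lines into an operation list, composes all inverse shuffles into one affine map (a,b) over Z/NZ (using pow(incr,-1,N) instead of A's hand-rolled egcd-based modular division per position), and applies that map to pos once at the end (returning pos directly when no line is an operation).
-- outside the precondition, e.g. on reverse_shuffle(-5, 10, ['deal into new stack']): A returns 14, B returns 4; on reverse_shuffle(3, -10, ['deal into new stack']): A returns -14, B returns -4
import Mathlib
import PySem

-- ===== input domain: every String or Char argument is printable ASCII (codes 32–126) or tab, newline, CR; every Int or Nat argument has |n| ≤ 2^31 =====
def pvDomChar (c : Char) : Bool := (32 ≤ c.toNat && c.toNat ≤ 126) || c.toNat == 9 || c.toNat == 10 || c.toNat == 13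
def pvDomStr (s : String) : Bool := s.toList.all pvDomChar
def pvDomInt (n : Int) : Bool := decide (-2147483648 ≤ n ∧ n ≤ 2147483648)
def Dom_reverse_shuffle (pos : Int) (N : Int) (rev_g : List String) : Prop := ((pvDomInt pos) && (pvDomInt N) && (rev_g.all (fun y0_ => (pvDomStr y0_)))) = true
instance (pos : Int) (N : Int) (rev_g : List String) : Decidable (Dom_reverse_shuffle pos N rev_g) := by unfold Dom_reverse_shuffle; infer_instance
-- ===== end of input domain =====

-- B composes all inverse shuffles into one affine map over Z/NZ applied once, instead of
-- transforming the position line by line with an egcd-based modular division per increment.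


-- ===== PORT A =====
-- termination fact for egcd's recursion (cited by name in decreasing_by)
theorem pvModNatAbsLt (b a : Int) (h : a ≠ 0) : (PySem.Int.mod b a).natAbs < a.natAbs := by
  rcases lt_or_gt_of_ne h with hneg | hpos
  · have h1 := PySem.Int.mod_neg_bounds b hneg
    omega
  · have h1 := PySem.Int.mod_nonneg b hpos
    have h2 := PySem.Int.mod_lt b hpos
    omega

-- def egcd(a, b): literal port (Python % and // via PySem)
def pvEgcd (a b : Int) : Int × Int × Int :=
  if a = 0 then (b, 0, 1)
  else
    let r := pvEgcd (PySem.Int.mod b a) a          -- g, y, x = egcd(b % a, a)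
    (r.1, r.2.2 - PySem.Int.floordiv b a * r.2.1, r.2.1)
termination_by a.natAbs
decreasing_by exact pvModNatAbsLt b a (by assumption)

-- def modinv(a, m): on g ≠ 1 Python raises Exception — that branch is excluded by Pre_, 0 is a placeholder
def pvModinv (a m : Int) : Int :=
  if (pvEgcd a m).1 ≠ 1 then 0
  else PySem.Int.mod (pvEgcd a m).2.1 m

def cutInv (pos N cut_num : Int) : Int := PySem.Int.mod (pos + cut_num) N

def dealIntoNewStackInv (pos N : Int) : Int := N - 1 - pos

def dealWithIncrementInv (pos N incr : Int) : Int :=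
  let c := PySem.Int.mod (pvModinv (PySem.Int.mod N incr) incr * (-pos)) incr
  PySem.Int.floordiv (pos + c * N) incr

-- one loop iteration of A; string ops on the char list: line[i] = pyGetD (in range under Pre_),
-- int(line[k:]) = ofChars? of drop k (Python's slice clamps exactly like drop; parse succeeds under Pre_)
def pvStepA (N : Int) (pos : Int) (line : String) : Int :=
  let cs := line.toList
  if PySem.List.pyGetD cs 0 ' ' = 'c' then
    cutInv pos N ((PySem.Int.ofChars? (cs.drop 3)).getD 0)
  else if PySem.List.pyGetD cs 5 ' ' = 'w' then
    dealWithIncrementInv pos N ((PySem.Int.ofChars? (cs.drop 19)).getD 0)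
  else if PySem.List.pyGetD cs 5 ' ' = 'i' then
    dealIntoNewStackInv pos N
  else pos

def reverse_shuffle (pos : Int) (N : Int) (rev_g : List String) : Int :=
  rev_g.foldl (pvStepA N) pos

-- ===== PORT B =====
-- pass 1 of B: parse one line into an operation (cut / increment / new-stack), if any
def pvLineOp (line : String) : Option (Char × Int) :=
  let cs := line.toList
  if PySem.List.pyGetD cs 0 ' ' = 'c' then
    some ('c', (PySem.Int.ofChars? (cs.drop 3)).getD 0)
  else if PySem.List.pyGetD cs 5 ' ' = 'w' then
    some ('w', (PySem.Int.ofChars? (cs.drop 19)).getD 0)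
  else if PySem.List.pyGetD cs 5 ' ' = 'i' then
    some ('s', 0)
  else none

-- ops.append(...) inside the parsing loop
def pvParseStep (acc : List (Char × Int)) (line : String) : List (Char × Int) :=
  match pvLineOp line with
  | some op => acc ++ [op]
  | none => acc

-- pass 2 of B: fold one operation into the affine pair (a, b);
-- pow(val, -1, N) is Python's canonical modular inverse in [0, N): ported as the Bézout
-- coefficient reduced mod N (exact under Pre_, which guarantees N ≥ 1 and gcd(val, N) = 1)
def pvStepB (N : Int) (ab : Int × Int) (op : Char × Int) : Int × Int :=
  if op.1 = 'c' then (ab.1, PySem.Int.mod (ab.2 + op.2) N)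
  else if op.1 = 'w' then
    let inv := PySem.Int.mod (Int.gcdA op.2 N) N
    (PySem.Int.mod (ab.1 * inv) N, PySem.Int.mod (ab.2 * inv) N)
  else (PySem.Int.mod (-ab.1) N, PySem.Int.mod (-1 - ab.2) N)

def reverse_shuffle_alt (pos : Int) (N : Int) (rev_g : List String) : Int :=
  let ops := rev_g.foldl pvParseStep []
  if ops.isEmpty then pos
  else
    let ab := ops.foldl (pvStepB N) (1, 0)
    PySem.Int.mod (ab.1 * pos + ab.2) N

-- ===== PRECONDITION & SPEC =====
-- what one line needs so that A processes it without raising: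
-- non-empty (line[0]); cut amount parses; otherwise length ≥ 6 (line[5]); an increment line's
-- amount parses, is ≥ 1 and is coprime to N (else int()/%0 raises or modinv raises Exception)
def pvLineOK (N : Int) (line : String) : Bool :=
  let cs := line.toList
  !cs.isEmpty &&
  (if PySem.List.pyGetD cs 0 ' ' = 'c' then (PySem.Int.ofChars? (cs.drop 3)).isSome
   else decide (6 ≤ cs.length) &&
     (if PySem.List.pyGetD cs 5 ' ' = 'w' then
        match PySem.Int.ofChars? (cs.drop 19) with
        | some incr => decide (1 ≤ incr ∧ Int.gcd incr N = 1)
        | none => false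
      else true))

-- a line A merely skips: not a cut, long enough to index, and neither increment nor new-stack
def pvIgnoredLine (line : String) : Bool :=
  let cs := line.toList
  !(PySem.List.pyGetD cs 0 ' ' == 'c') && decide (6 ≤ cs.length) &&
  !(PySem.List.pyGetD cs 5 ' ' == 'w') && !(PySem.List.pyGetD cs 5 ' ' == 'i')

-- Besides the lines on which A raises, Pre_ restricts to the function's natural domain whenever
-- some line actually shuffles: a positive deck size N and a deck position 0 ≤ pos < N (outside it
-- A applies deck arithmetic to a position that is not in the deck and returns out-of-range values,
-- e.g. 14 for pos = -5, N = 10 on a new-stack line, where no reduced answer is specified);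
-- when every line is skipped, pos and N are unconstrained.
def Pre_reverse_shuffle (pos : Int) (N : Int) (rev_g : List String) : Prop :=
  rev_g.all (pvLineOK N) = true ∧
  ((1 ≤ N ∧ 0 ≤ pos ∧ pos < N) ∨ rev_g.all pvIgnoredLine = true)

instance (pos : Int) (N : Int) (rev_g : List String) : Decidable (Pre_reverse_shuffle pos N rev_g) := by
  unfold Pre_reverse_shuffle; infer_instance

def pvWitness_reverse_shuffle : Int × Int × List String :=
  (3, 10, ["cut 3", "deal into new stack", "deal with increment 7"])

def Spec_reverse_shuffle (pos : Int) (N : Int) (rev_g : List String) (out : Int) : Prop := out = reverse_shuffle_alt pos N rev_g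
instance (pos : Int) (N : Int) (rev_g : List String) (out : Int) : Decidable (Spec_reverse_shuffle pos N rev_g out) := by unfold Spec_reverse_shuffle; infer_instance

-- ===== CLAIM (what is proved, stated in full; the proofs are below) =====
def Claim_equal_reverse_shuffle : Prop := ∀ (pos : Int) (N : Int) (rev_g : List String), Dom_reverse_shuffle pos N rev_g → Pre_reverse_shuffle pos N rev_g → Spec_reverse_shuffle pos N rev_g (reverse_shuffle pos N rev_g)

-- ===== LEMMAS AND PROOFS =====

theorem emodModEq (a N : Int) : Int.ModEq N (a % N) a :=
  Int.emod_emod_of_dvd a dvd_rfl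

theorem eqEmodOfModEq {N x y : Int} (h : Int.ModEq N x y) (h0 : 0 ≤ x) (h1 : x < N) :
    x = y % N := by
  rw [← Int.emod_eq_of_lt h0 h1]; exact h

theorem pvEgcdBezout (a b : Int) : a * (pvEgcd a b).2.1 + b * (pvEgcd a b).2.2 = (pvEgcd a b).1 := by
  induction a, b using pvEgcd.induct with
  | case1 b => simp [pvEgcd]
  | case2 a b h ih =>
    rw [pvEgcd, if_neg h]
    have hb := PySem.Int.floordiv_mul_add_mod b a
    dsimp only
    linear_combination ih - (pvEgcd (PySem.Int.mod b a) a).2.1 * hb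

theorem pvEgcdGcd (a b : Int) : 0 ≤ a → 0 ≤ b → (pvEgcd a b).1 = Int.gcd a b := by
  induction a, b using pvEgcd.induct with
  | case1 b =>
    intro _ hb
    simp [pvEgcd, Int.gcd]
    exact (abs_of_nonneg hb).symm
  | case2 a b h ih =>
    intro ha hb
    have hapos : 0 < a := lt_of_le_of_ne ha (Ne.symm h)
    rw [pvEgcd, if_neg h]
    dsimp only
    rw [ih (PySem.Int.mod_nonneg b hapos) ha,
        PySem.Int.mod_eq_emod_of_pos hapos, Int.gcd_emod b a, Int.gcd_comm]

theorem pvModinvInverse (a m : Int) (ha : 0 ≤ a) (hm : 0 < m) (hg : Int.gcd a m = 1) :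
    Int.ModEq m (pvModinv a m * a) 1 := by
  have hgcd : (pvEgcd a m).1 = 1 := by
    rw [pvEgcdGcd a m ha (le_of_lt hm), hg]; rfl
  have hbez := pvEgcdBezout a m
  rw [hgcd] at hbez
  unfold pvModinv
  rw [hgcd]
  simp only [ne_eq, not_true_eq_false, ite_false]
  rw [PySem.Int.mod_eq_emod_of_pos hm]
  have h1 : Int.ModEq m ((pvEgcd a m).2.1 % m * a) ((pvEgcd a m).2.1 * a) :=
    (emodModEq _ _).mul_right a
  refine h1.trans ?_
  rw [Int.modEq_iff_dvd]
  exact ⟨(pvEgcd a m).2.2, by linarith⟩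

theorem gcdABezout (incr N : Int) (hg : Int.gcd incr N = 1) :
    Int.ModEq N (Int.gcdA incr N % N * incr) 1 := by
  have hbez := Int.gcd_eq_gcd_ab incr N
  rw [hg] at hbez
  have h1 : Int.ModEq N (Int.gcdA incr N % N * incr) (Int.gcdA incr N * incr) :=
    (emodModEq _ _).mul_right incr
  refine h1.trans ?_
  rw [Int.modEq_iff_dvd]
  exact ⟨Int.gcdB incr N, by push_cast at hbez; linarith⟩

-- the increment branch: A's per-position exact division equals multiplying by the inverse mod N
theorem incrBranch (N incr t : Int) (hN : 0 < N) (hi : 1 ≤ incr) (hg : Int.gcd incr N = 1) :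
    dealWithIncrementInv (t % N) N incr = Int.gcdA incr N % N * t % N := by
  have hipos : (0:Int) < incr := hi
  set q := t % N with hqdef
  have hq0 : 0 ≤ q := Int.emod_nonneg t (by omega)
  have hqN : q < N := Int.emod_lt_of_pos t hN
  unfold dealWithIncrementInv
  rw [PySem.Int.mod_eq_emod_of_pos hipos, PySem.Int.mod_eq_emod_of_pos hipos,
      PySem.Int.floordiv_eq_ediv_of_pos hipos]
  set m2 := pvModinv (N % incr) incr with hm2
  set c := m2 * (-q) % incr with hcdef
  have hc0 : 0 ≤ c := Int.emod_nonneg _ (by omega)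
  have hci : c < incr := Int.emod_lt_of_pos _ hipos
  -- incr divides q + c * N
  have hinv2 : Int.ModEq incr (m2 * (N % incr)) 1 := by
    refine pvModinvInverse (N % incr) incr (Int.emod_nonneg N (by omega)) hipos ?_
    rw [Int.gcd_emod N incr, Int.gcd_comm, hg]
  have hdvd : incr ∣ q + c * N := by
    rw [← Int.modEq_zero_iff_dvd]
    have h1 : Int.ModEq incr (c * N) (m2 * (-q) * N) := (emodModEq _ _).mul_right N
    have h2 : Int.ModEq incr (m2 * (-q) * N) (m2 * (-q) * (N % incr)) :=
      Int.ModEq.mul_left _ (emodModEq _ _).symm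
    have h3 : Int.ModEq incr (m2 * (-q) * (N % incr)) (-q) := by
      have := hinv2.mul_left (-q)
      calc m2 * (-q) * (N % incr) = -q * (m2 * (N % incr)) := by ring
        _ ≡ -q * 1 [ZMOD incr] := this
        _ = -q := by ring
    have h4 : Int.ModEq incr (q + c * N) (q + -q) := Int.ModEq.add_left q ((h1.trans h2).trans h3)
    simpa using h4
  set r := (q + c * N) / incr with hrdef
  have hrmul : r * incr = q + c * N := Int.ediv_mul_cancel hdvd
  have hbound : q + c * N < incr * N := by nlinarith
  have hr0 : 0 ≤ r := by nlinarith [mul_pos hipos hN]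
  have hrN : r < N := by nlinarith
  -- r ≡ inv * t (mod N)
  have hinvB := gcdABezout incr N hg
  set inv := Int.gcdA incr N % N with hinvdef
  have hstep1 : Int.ModEq N r (inv * t) := by
    calc r = r * 1 := by ring
      _ ≡ r * (inv * incr) [ZMOD N] := (hinvB.mul_left r).symm
      _ = inv * (r * incr) := by ring
      _ = inv * (q + c * N) := by rw [hrmul]
      _ ≡ inv * (q + 0) [ZMOD N] := by
          exact Int.ModEq.mul_left inv (Int.ModEq.add_left q (Int.modEq_zero_iff_dvd.mpr ⟨c, by ring⟩))
      _ = inv * q := by ring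
      _ ≡ inv * t [ZMOD N] := Int.ModEq.mul_left inv (emodModEq t N)
  exact eqEmodOfModEq hstep1 hr0 hrN

-- per-line update of B's affine pair, phrased on the raw line (proof-side view of B's two passes)
def pvStepBLine (N : Int) (ab : Int × Int) (line : String) : Int × Int :=
  match pvLineOp line with
  | some op => pvStepB N ab op
  | none => ab

-- B's parse-then-fold equals a single fold of pvStepBLine over the lines
theorem parseBridge (N : Int) (l : List String) :
    ∀ (acc : List (Char × Int)) (init : Int × Int),
    (l.foldl pvParseStep acc).foldl (pvStepB N) init
      = l.foldl (pvStepBLine N) (acc.foldl (pvStepB N) init) := by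
  induction l with
  | nil => intro acc init; rfl
  | cons x l ih =>
    intro acc init
    rw [List.foldl_cons, List.foldl_cons, ih]
    unfold pvParseStep pvStepBLine
    cases pvLineOp x with
    | some op => rw [List.foldl_append]; rfl
    | none => rfl

-- an ignored line changes neither A's position nor B's parsed operations
theorem ignoredStepA (N pos : Int) (line : String) (hig : pvIgnoredLine line = true) :
    pvStepA N pos line = pos := by
  unfold pvIgnoredLine at hig
  simp only [Bool.and_eq_true, Bool.not_eq_true', beq_eq_false_iff_ne, ne_eq] at hig
  obtain ⟨⟨⟨h0, -⟩, h5⟩, h5i⟩ := hig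
  unfold pvStepA
  simp only [h0, h5, h5i, reduceIte]

theorem ignoredLineOp (line : String) (hig : pvIgnoredLine line = true) :
    pvLineOp line = none := by
  unfold pvIgnoredLine at hig
  simp only [Bool.and_eq_true, Bool.not_eq_true', beq_eq_false_iff_ne, ne_eq] at hig
  obtain ⟨⟨⟨h0, -⟩, h5⟩, h5i⟩ := hig
  unfold pvLineOp
  simp only [h0, h5, h5i, reduceIte]

theorem ignoredFoldA (N : Int) (l : List String) :
    ∀ pos : Int, l.all pvIgnoredLine = true → l.foldl (pvStepA N) pos = pos := by
  induction l with
  | nil => intro pos _; rfl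
  | cons x l ih =>
    intro pos hall
    rw [List.all_cons, Bool.and_eq_true] at hall
    rw [List.foldl_cons, ignoredStepA N pos x hall.1]
    exact ih pos hall.2

theorem ignoredParse (l : List String) :
    ∀ acc : List (Char × Int), l.all pvIgnoredLine = true → l.foldl pvParseStep acc = acc := by
  induction l with
  | nil => intro acc _; rfl
  | cons x l ih =>
    intro acc hall
    rw [List.all_cons, Bool.and_eq_true] at hall
    rw [List.foldl_cons]
    unfold pvParseStep
    rw [ignoredLineOp x hall.1]
    exact ih acc hall.2

-- one line of A, started from the reduced affine value, equals B's updated affine map applied to p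
theorem stepAffine (N : Int) (hN : 1 ≤ N) (line : String) (hok : pvLineOK N line = true)
    (a b p : Int) :
    pvStepA N (PySem.Int.mod (a * p + b) N) line
      = PySem.Int.mod ((pvStepBLine N (a, b) line).1 * p + (pvStepBLine N (a, b) line).2) N := by
  have hNpos : (0:Int) < N := by omega
  have hmodN : ∀ x : Int, PySem.Int.mod x N = x % N := fun x => PySem.Int.mod_eq_emod_of_pos hNpos
  unfold pvStepA pvStepBLine pvLineOp pvStepB pvLineOK at *
  set cs := line.toList with hcs
  by_cases h0 : PySem.List.pyGetD cs 0 ' ' = 'c'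
  · -- cut line
    simp only [h0, Char.reduceEq, reduceIte]
    set k := (PySem.Int.ofChars? (cs.drop 3)).getD 0
    unfold cutInv
    simp only [hmodN]
    calc (a * p + b) % N + k ≡ (a * p + b) + k [ZMOD N] := (emodModEq _ _).add_right k
      _ = a * p + (b + k) := by ring
      _ ≡ a * p + (b + k) % N [ZMOD N] := Int.ModEq.add_left _ (emodModEq _ _).symm
  · by_cases h5 : PySem.List.pyGetD cs 5 ' ' = 'w'
    · -- increment line
      simp only [h0, h5, Char.reduceEq, reduceIte] at hok ⊢
      rcases hparse : PySem.Int.ofChars? (cs.drop 19) with _ | incr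
      · rw [hparse] at hok; simp at hok
      · rw [hparse] at hok
        simp only [Bool.and_eq_true, decide_eq_true_eq] at hok
        obtain ⟨-, -, hi, hg⟩ := hok
        simp only [Option.getD_some, hmodN]
        rw [incrBranch N incr (a * p + b) hNpos hi hg]
        set inv := Int.gcdA incr N % N
        calc inv * (a * p + b) = a * inv * p + b * inv := by ring
          _ ≡ a * inv % N * p + b * inv % N [ZMOD N] :=
            Int.ModEq.add ((emodModEq _ _).symm.mul_right p) (emodModEq _ _).symm
    · by_cases h5i : PySem.List.pyGetD cs 5 ' ' = 'i'
      · -- new-stack line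
        simp only [h0, h5i, Char.reduceEq, reduceIte]
        unfold dealIntoNewStackInv
        simp only [hmodN]
        have hq0 : 0 ≤ (a * p + b) % N := Int.emod_nonneg _ (by omega)
        have hqN : (a * p + b) % N < N := Int.emod_lt_of_pos _ hNpos
        have h1 : Int.ModEq N (N - 1 - (a * p + b) % N) (-a % N * p + (-1 - b) % N) := by
          calc N - 1 - (a * p + b) % N
              ≡ N - 1 - (a * p + b) [ZMOD N] := Int.ModEq.sub_left _ (emodModEq _ _)
            _ ≡ 0 - 1 - (a * p + b) [ZMOD N] := by
                rw [Int.modEq_iff_dvd]; exact ⟨-1, by ring⟩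
            _ = -a * p + (-1 - b) := by ring
            _ ≡ -a % N * p + (-1 - b) % N [ZMOD N] :=
                Int.ModEq.add ((emodModEq _ _).symm.mul_right p) (emodModEq _ _).symm
        exact eqEmodOfModEq h1 (by omega) (by omega)
      · -- ignored line: position and affine pair both unchanged
        simp only [h0, h5, h5i, reduceIte]

theorem foldAffine (N : Int) (hN : 1 ≤ N) (l : List String) :
    ∀ (a b p : Int), l.all (pvLineOK N) = true →
    l.foldl (pvStepA N) (PySem.Int.mod (a * p + b) N)
      = PySem.Int.mod ((l.foldl (pvStepBLine N) (a, b)).1 * p + (l.foldl (pvStepBLine N) (a, b)).2) N := by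
  induction l with
  | nil => intro a b p _; rfl
  | cons line rest ih =>
    intro a b p hall
    rw [List.all_cons, Bool.and_eq_true] at hall
    obtain ⟨hok, hrest⟩ := hall
    rw [List.foldl_cons, List.foldl_cons, stepAffine N hN line hok a b p]
    exact ih (pvStepBLine N (a, b) line).1 (pvStepBLine N (a, b) line).2 p hrest

-- ===== VERDICT (by name: the statement is the Claim_ definition above) =====
theorem reverse_shuffle_spec : Claim_equal_reverse_shuffle := by
  intro pos N rev_g _hdom hpre
  obtain ⟨hall, hcase⟩ := hpre
  unfold Spec_reverse_shuffle reverse_shuffle reverse_shuffle_alt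
  rcases hcase with ⟨hN, hp0, hpN⟩ | hig
  · -- some line may shuffle: 1 ≤ N and pos is a deck position
    have hpos : PySem.Int.mod (1 * pos + 0) N = pos := by
      rw [PySem.Int.mod_eq_emod_of_pos (by omega), one_mul, add_zero, Int.emod_eq_of_lt hp0 hpN]
    have hbridge : (rev_g.foldl pvParseStep []).foldl (pvStepB N) (1, 0)
        = rev_g.foldl (pvStepBLine N) (1, 0) := parseBridge N rev_g [] (1, 0)
    have hA : rev_g.foldl (pvStepA N) pos
        = PySem.Int.mod ((rev_g.foldl (pvStepBLine N) (1, 0)).1 * pos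
            + (rev_g.foldl (pvStepBLine N) (1, 0)).2) N := by
      conv_lhs => rw [← hpos]
      exact foldAffine N hN rev_g 1 0 pos hall
    by_cases hemp : (rev_g.foldl pvParseStep []).isEmpty
    · -- every line was skipped after all: the identity map
      simp only [hemp, if_pos]
      rw [List.isEmpty_iff] at hemp
      rw [hemp] at hbridge
      rw [hA, ← hbridge]
      exact hpos
    · rw [Bool.not_eq_true] at hemp
      simp only [hemp, Bool.false_eq_true, ite_false]
      rw [hA, hbridge]
  · -- every line is skipped: A returns pos untouched, B parses no operation
    rw [ignoredFoldA N rev_g pos hig, ignoredParse rev_g [] hig]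
    rfl
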